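-- pv_equiv track=rewrite | github.com/pypi-data/pypi-mirror-277 | packages/mat-view/mat_view-0.1b0-py3-none-any.whl/matview/web/definitions.py | metricName
-- ===== SOURCE A (Python) =====
-- METRIC_NAMES = {
--     'f_score':       'F-Score',
--     'f1_score':      'F-Measure',
--     'accuracy':      'Accuracy',
--     'accuracyTop5':  'Accuracy Top 5',
--     'precision':     'Precision',
--     'recall':        'Recall',
--     'loss':          'Loss',
--
--     # TIME specific
--     'clstime':       'Classification Time',
--     'totaltime':     'Total Runtime',
--
--     # Movelets specific
--     'candidates':    'Number of Candidates',
--     'movelets':      'Number of Movelets',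
-- }
--
-- def metricName(code):
--     code = code.replace('metric:', '')
--
--     if code in METRIC_NAMES.keys():
--         return METRIC_NAMES[code]
--
--     name = code[0].upper()
--     for c in code[1:]:
--         if c.isupper():
--             name += ' ' + c
--         elif c.isdigit() and not name[-1].isdigit():
--             name += ' ' + c
--         elif c == '_':
--             name += '-'
--         else:
--             name += c
--
--     return name
-- ===== SOURCE B (Python) =====
-- METRIC_NAMES = {
--     'f_score':       'F-Score',
--     'f1_score':      'F-Measure',
--     'accuracy':      'Accuracy',
--     'accuracyTop5':  'Accuracy Top 5',
--     'precision':     'Precision',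
--     'recall':        'Recall',
--     'loss':          'Loss',
--     'clstime':       'Classification Time',
--     'totaltime':     'Total Runtime',
--     'candidates':    'Number of Candidates',
--     'movelets':      'Number of Movelets',
-- }
--
-- def metricName(code):
--     code = code.replace('metric:', '')
--     if code in METRIC_NAMES:
--         return METRIC_NAMES[code]
--     # staged passes instead of A's stateful accumulator loop:
--     # 1) transform characters (uppercase the head, '_' -> '-'),
--     # 2) collect the token-boundary indices,
--     # 3) cut the string there and join the tokens with spaces.
--     s = code[0].upper() + ''.join('-' if c == '_' else c for c in code[1:])
--     cuts = [i for i in range(1, len(s))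
--             if s[i].isupper() or (s[i].isdigit() and not s[i - 1].isdigit())]
--     return ' '.join(s[a:b] for a, b in zip([0] + cuts, cuts + [len(s)]))
-- ===== Notes on version B (the rewrite author's own statement) =====
-- stated objective: alternative
-- what changed: A's single stateful loop appending to name and inspecting name[-1] is replaced by three staged passes: transform the characters (uppercase head, '_'->'-'), compute the list of token-boundary indices, then slice the string at those boundaries and join the tokens with spaces.
-- outside the precondition, e.g. on metricName(''): A raises IndexError, B raises IndexError; on metricName('metric:'): A raises IndexError, B raises IndexError
import Mathlib
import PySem

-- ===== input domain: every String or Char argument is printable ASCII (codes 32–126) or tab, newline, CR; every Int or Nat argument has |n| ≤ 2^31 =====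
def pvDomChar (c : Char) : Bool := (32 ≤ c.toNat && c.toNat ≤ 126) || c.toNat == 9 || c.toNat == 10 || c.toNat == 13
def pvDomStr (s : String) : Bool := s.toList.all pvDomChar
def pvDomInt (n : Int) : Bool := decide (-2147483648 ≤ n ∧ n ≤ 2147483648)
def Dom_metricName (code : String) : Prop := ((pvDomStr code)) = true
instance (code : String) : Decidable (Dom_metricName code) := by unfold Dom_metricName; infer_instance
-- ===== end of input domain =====

-- B replaces A's stateful accumulator loop (which inspects name[-1]) by three staged
-- passes: transform the characters, collect the token-boundary indices, then slice the
-- string at those boundaries and join the tokens with spaces.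
-- Objective: alternative (same cost, different decomposition).

-- ===== PORT A =====
def mnDict : PySem.Dict String String := PySem.Dict.ofList [
  ("f_score",      "F-Score"),
  ("f1_score",     "F-Measure"),
  ("accuracy",     "Accuracy"),
  ("accuracyTop5", "Accuracy Top 5"),
  ("precision",    "Precision"),
  ("recall",       "Recall"),
  ("loss",         "Loss"),
  ("clstime",      "Classification Time"),
  ("totaltime",    "Total Runtime"),
  ("candidates",   "Number of Candidates"),
  ("movelets",     "Number of Movelets")]

-- one iteration of A's loop; name[-1] via pyGetD (name is never empty: it starts at [code[0].upper()])
def mnStep (name : List Char) (c : Char) : List Char :=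
  if PySem.Chars.isupper c then name ++ [' ', c]
  else if PySem.Chars.isdigit c && !PySem.Chars.isdigit (PySem.List.pyGetD name (-1) ' ') then name ++ [' ', c]
  else if c = '_' then name ++ ['-']
  else name ++ [c]

def metricName (code : String) : String :=
  let code := PySem.Str.replace code "metric:" ""
  if mnDict.contains code then mnDict.getD code ""
  else
    match code.toList with
    | [] => ""   -- Python raises IndexError on code[0]; excluded by Pre_
    | c0 :: rest => String.ofList (rest.foldl mnStep [PySem.Chars.upperChar c0])

-- ===== PORT B =====
-- boundary test for index i of the transformed string s (B's list-comprehension filter)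
def mnCut (s : List Char) (i : Int) : Bool :=
  PySem.Chars.isupper (PySem.List.pyGetD s i ' ') ||
    (PySem.Chars.isdigit (PySem.List.pyGetD s i ' ') &&
      !PySem.Chars.isdigit (PySem.List.pyGetD s (i - 1) ' '))

def metricName_alt (code : String) : String :=
  let code := PySem.Str.replace code "metric:" ""
  if mnDict.contains code then mnDict.getD code ""
  else
    match code.toList with
    | [] => ""   -- Python raises IndexError on code[0]; excluded by Pre_
    | c0 :: rest =>
      -- s = code[0].upper() + ''.join('-' if c == '_' else c for c in code[1:])
      let s : List Char := PySem.Chars.upperChar c0 :: rest.map (fun c => if c = '_' then '-' else c)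
      -- cuts = [i for i in range(1, len(s)) if …]
      let cuts : List Int := (PySem.List.pyRange 1 (s.length : Int) 1).filter (mnCut s)
      -- ' '.join(s[a:b] for a, b in zip([0] + cuts, cuts + [len(s)]))
      let parts : List (List Char) :=
        (((0 : Int) :: cuts).zip (cuts ++ [(s.length : Int)])).map
          (fun ab => PySem.List.slice s (some ab.1) (some ab.2))
      String.ofList (PySem.Chars.join [' '] parts)

-- ===== PRECONDITION & SPEC =====
-- Pre_ excludes exactly the inputs whose code.replace('metric:','') is empty: there both Pythons raise IndexError on code[0].
def Pre_metricName (code : String) : Prop := PySem.Str.replace code "metric:" "" ≠ ""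
instance (code : String) : Decidable (Pre_metricName code) := by unfold Pre_metricName; infer_instance
def pvWitness_metricName : String := "accuracyTop99"

def Spec_metricName (code : String) (out : String) : Prop := out = metricName_alt code
instance (code : String) (out : String) : Decidable (Spec_metricName code out) := by unfold Spec_metricName; infer_instance

-- ===== CLAIM (what is proved, stated in full; the proofs are below) =====
def Claim_equal_metricName : Prop := ∀ (code : String), Dom_metricName code → Pre_metricName code → Spec_metricName code (metricName code)

-- ===== LEMMAS AND PROOFS =====

-- the character transformation of stage 1 ('_' -> '-'; the head is uppercased separately)
def mnTr (c : Char) : Char := if c = '_' then '-' else c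

-- the boundary condition on (previous, current) TRANSFORMED characters
def mnCond (p c : Char) : Bool :=
  PySem.Chars.isupper c || (PySem.Chars.isdigit c && !PySem.Chars.isdigit p)

-- the common intermediate form both programs are reduced to: the output tail for the
-- transformed characters cs, given the previous transformed character p
def mnPieces : Char → List Char → List Char
  | _, [] => []
  | p, c :: cs => (if mnCond p c then [' ', c] else [c]) ++ mnPieces c cs

theorem mn_step_eq (acc : List Char) (hne : acc ≠ []) (p c : Char)
    (hp : PySem.Chars.isdigit (acc.getLast hne) = PySem.Chars.isdigit p) :
    mnStep acc c = acc ++ (if mnCond p (mnTr c) then [' ', mnTr c] else [mnTr c]) := by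
  unfold mnStep mnCond
  rw [PySem.List.pyGetD_neg_one acc ' ' hne, hp]
  by_cases h3 : c = '_'
  · subst h3
    simp [mnTr, show PySem.Chars.isupper '_' = false from rfl,
      show PySem.Chars.isdigit '_' = false from rfl,
      show PySem.Chars.isupper '-' = false from rfl,
      show PySem.Chars.isdigit '-' = false from rfl]
  · have htr : mnTr c = c := by simp [mnTr, h3]
    rw [htr]
    by_cases h1 : PySem.Chars.isupper c
    · simp [h1]
    · by_cases h2 : PySem.Chars.isdigit c && !PySem.Chars.isdigit p
      · simp [h1, h2]
      · simp [h1, h2, h3]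

theorem mn_loop_eq (rest : List Char) :
    ∀ (acc : List Char) (hne : acc ≠ []) (p : Char),
    PySem.Chars.isdigit (acc.getLast hne) = PySem.Chars.isdigit p →
    rest.foldl mnStep acc = acc ++ mnPieces p (rest.map mnTr) := by
  induction rest with
  | nil => intro acc hne p _; simp [mnPieces]
  | cons c rest ih =>
    intro acc hne p hp
    have hstep := mn_step_eq acc hne p c hp
    have hne' : mnStep acc c ≠ [] := by
      rw [hstep]; split_ifs <;> simp
    have hlast : PySem.Chars.isdigit ((mnStep acc c).getLast hne') = PySem.Chars.isdigit (mnTr c) := by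
      have h2 : (mnStep acc c).getLast hne' = mnTr c := by
        rw [List.getLast_congr hne' (by split_ifs <;> simp) hstep]
        split_ifs <;> simp
      rw [h2]
    have := ih (mnStep acc c) hne' (mnTr c) hlast
    rw [List.foldl_cons, this, hstep, List.map_cons, mnPieces, List.append_assoc]

theorem mn_flatMap_singleton (s : List Char) :
    ∀ (m a : Nat), a + m ≤ s.length →
    (List.range' a m).flatMap (fun i => [s.getD i ' ']) = (s.drop a).take m := by
  intro m
  induction m with
  | zero => intro a _; simp
  | succ m ih =>
    intro a h
    rw [List.range'_succ, List.flatMap_cons, ih (a+1) (by omega)]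
    have ha : a < s.length := by omega
    have h1 : s.getD a ' ' = s[a] := List.getD_eq_getElem s ' ' ha
    have h2 : (s.drop a).take (m+1) = s[a] :: (s.drop (a+1)).take m := by
      rw [List.drop_eq_getElem_cons ha, List.take_succ_cons]
    rw [h1, h2]; rfl

theorem mn_join_slices (s : List Char) :
    ∀ (cuts : List Nat) (a : Nat), a ≤ s.length →
    cuts.Pairwise (· < ·) → (∀ c ∈ cuts, a < c ∧ c < s.length) →
    PySem.Chars.join [' ']
        (((a :: cuts).zip (cuts ++ [s.length])).map
          (fun ab => (s.drop ab.1).take (ab.2 - ab.1)))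
      = (List.range' a (s.length - a)).flatMap
          (fun i => (if i ∈ cuts then [' '] else []) ++ [s.getD i ' ']) := by
  intro cuts
  induction cuts with
  | nil =>
    intro a ha _ _
    simp only [List.zip_cons_cons, List.zip_nil_left, List.nil_append, List.map_cons, List.map_nil]
    rw [PySem.Chars.join_singleton]
    have : ∀ i : Nat, ((if i ∈ ([] : List Nat) then [' '] else []) ++ [s.getD i ' ']) = [s.getD i ' '] := by
      intro i; simp
    simp only [this]
    rw [mn_flatMap_singleton s (s.length - a) a (by omega)]
  | cons c cuts ih =>
    intro a ha hpw hmem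
    have hac : a < c := (hmem c (by simp)).1
    have hcn : c < s.length := (hmem c (by simp)).2
    have hcuts_gt : ∀ x ∈ cuts, c < x := by
      intro x hx; exact List.rel_of_pairwise_cons hpw hx
    -- LHS: peel the first part
    obtain ⟨y, l, hyl⟩ : ∃ y l, (((c :: cuts).zip (cuts ++ [s.length])).map
        (fun ab => (s.drop ab.1).take (ab.2 - ab.1))) = y :: l := by
      rcases cuts with _ | ⟨d, ds⟩ <;> exact ⟨_, _, rfl⟩
    have hIH := ih c (by omega) hpw.of_cons
      (fun x hx => ⟨hcuts_gt x hx, (hmem x (by simp [hx])).2⟩)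
    have hz : (a :: c :: cuts).zip (c :: cuts ++ [s.length])
        = (a, c) :: (c :: cuts).zip (cuts ++ [s.length]) := rfl
    rw [hz, List.map_cons, hyl, PySem.Chars.join_cons_cons, ← hyl, hIH]
    -- RHS: split the range at c
    have hsplit : List.range' a (s.length - a) = List.range' a (c - a) ++ List.range' c (s.length - c) := by
      have h := @List.range'_append a (c - a) (s.length - c) 1
      simp only [one_mul] at h
      rw [show a + (c - a) = c by omega] at h
      rw [show (c - a) + (s.length - c) = s.length - a by omega] at h
      exact h.symm
    rw [hsplit, List.flatMap_append]
    -- first chunk: no cut positions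
    have h1 : (List.range' a (c - a)).flatMap
        (fun i => (if i ∈ c :: cuts then [' '] else []) ++ [s.getD i ' '])
        = (s.drop a).take (c - a) := by
      rw [← mn_flatMap_singleton s (c - a) a (by omega)]
      apply List.flatMap_congr
      intro i hi
      have : i < c := by
        have := List.mem_range'.mp hi
        omega
      have hni : i ∉ c :: cuts := by
        simp only [List.mem_cons]
        push Not
        exact ⟨by omega, fun hx => absurd (hcuts_gt i hx) (by omega)⟩
      simp [hni]
    rw [h1]
    -- second chunk: a space at c, then the tail ranges agree
    have hrc : List.range' c (s.length - c) = c :: List.range' (c + 1) (s.length - c - 1) := by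
      rw [show s.length - c = (s.length - c - 1) + 1 by omega, List.range'_succ]
      simp
    rw [hrc, List.flatMap_cons, List.flatMap_cons]
    have hcc : c ∈ c :: cuts := by simp
    have hnc : c ∉ cuts := fun hx => absurd (hcuts_gt c hx) (by omega)
    simp only [if_pos hcc, if_neg hnc, List.nil_append]
    have h2 : (List.range' (c + 1) (s.length - c - 1)).flatMap
        (fun i => (if i ∈ c :: cuts then [' '] else []) ++ [s.getD i ' '])
        = (List.range' (c + 1) (s.length - c - 1)).flatMap
        (fun i => (if i ∈ cuts then [' '] else []) ++ [s.getD i ' ']) := by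
      apply List.flatMap_congr
      intro i hi
      have hic : c < i := by
        have := List.mem_range'.mp hi
        omega
      have : (i ∈ c :: cuts) ↔ (i ∈ cuts) := by
        simp only [List.mem_cons]
        constructor
        · rintro (h | h); · omega
          · exact h
        · exact Or.inr
      simp only [this]
    rw [h2]
    simp [List.append_assoc]

theorem mn_flatMap_pieces (xs : List Char) :
    ∀ (u : Char),
    (List.range' 1 xs.length).flatMap
        (fun i => (if mnCond ((u :: xs).getD (i - 1) ' ') ((u :: xs).getD i ' ') then [' '] else [])
          ++ [(u :: xs).getD i ' '])
      = mnPieces u xs := by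
  induction xs with
  | nil => intro u; simp [mnPieces]
  | cons c cs ih =>
    intro u
    rw [List.length_cons, List.range'_succ, List.flatMap_cons]
    have hsh : List.range' 2 cs.length = (List.range' 1 cs.length).map (· + 1) := by
      rw [List.range'_eq_map_range, List.range'_eq_map_range, List.map_map]
      apply List.map_congr_left
      intro j _
      simp
      omega
    rw [hsh, List.flatMap_map]
    have hcg : (List.range' 1 cs.length).flatMap
        (fun i => (if mnCond ((u :: c :: cs).getD (i + 1 - 1) ' ') ((u :: c :: cs).getD (i + 1) ' ') then [' '] else [])
          ++ [(u :: c :: cs).getD (i + 1) ' '])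
        = (List.range' 1 cs.length).flatMap
        (fun i => (if mnCond ((c :: cs).getD (i - 1) ' ') ((c :: cs).getD i ' ') then [' '] else [])
          ++ [(c :: cs).getD i ' ']) := by
      apply List.flatMap_congr
      intro i hi
      rcases List.mem_range'.mp hi with ⟨k, hklt, hik⟩
      rw [show i = k + 1 by omega]
      simp
    rw [hcg, ih c]
    show ((if mnCond u c then [' '] else []) ++ [c]) ++ mnPieces c cs = mnPieces u (c :: cs)
    rw [mnPieces]
    split_ifs <;> rfl

-- cast bridge: B's Int-valued cut list is the Nat-valued filtered range
theorem mn_cuts_natCast (m : Nat) (q : Int → Bool) :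
    (PySem.List.pyRange 1 ((m + 1 : Nat) : Int) 1).filter q
      = ((List.range' 1 m).filter (fun (i : Nat) => q (i : Int))).map (fun (i : Nat) => (i : Int)) := by
  rw [PySem.List.pyRange_one]
  have hm : (((m + 1 : Nat) : Int) - 1).toNat = m := by omega
  rw [hm, List.range'_eq_map_range]
  simp only [List.filter_map, List.map_map]
  have h1 : ∀ k ∈ List.range m, (q ∘ fun k : Nat => (1:Int) + (k:Int)) k
      = ((fun i : Nat => q (i : Int)) ∘ (fun x => 1 + x)) k := by
    intro k _
    simp only [Function.comp]
    norm_num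
  rw [List.filter_congr h1]
  apply List.map_congr_left
  intro k _
  simp only [Function.comp]
  push_cast
  ring

-- ===== VERDICT (by name: the statement is the Claim_ definition above) =====
theorem metricName_spec : Claim_equal_metricName := by
  intro code _ hpre
  unfold Spec_metricName metricName metricName_alt
  by_cases hd : mnDict.contains (PySem.Str.replace code "metric:" "") <;>
    simp only [hd, if_true, if_false, Bool.false_eq_true]
  cases hs : (PySem.Str.replace code "metric:" "").toList with
  | nil => exact absurd (String.toList_eq_nil_iff.mp hs) hpre
  | cons c0 rest =>
    dsimp only
    -- shared names for A's and B's pieces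
    set u0 := PySem.Chars.upperChar c0 with hu0
    set xs : List Char := rest.map (fun c => if c = '_' then '-' else c) with hxs
    have hxs' : xs = rest.map mnTr := rfl
    -- A's loop reduced to the common form
    have hA : rest.foldl mnStep [u0] = u0 :: mnPieces u0 xs := by
      rw [mn_loop_eq rest [u0] (by simp) u0 (by simp)]
      rw [hxs']
      rfl
    rw [hA]
    -- B's staged passes reduced to the same form
    have hlen : (u0 :: xs).length = rest.length + 1 := by simp [hxs]
    have hnc : (PySem.List.pyRange 1 (((u0 :: xs).length : Nat) : Int) 1).filter (mnCut (u0 :: xs))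
        = ((List.range' 1 rest.length).filter (fun (i : Nat) => mnCut (u0 :: xs) (i : Int))).map
            (fun (i : Nat) => (i : Int)) := by
      rw [show (((u0 :: xs).length : Nat) : Int) = ((rest.length + 1 : Nat) : Int) by rw [hlen]]
      exact mn_cuts_natCast rest.length (mnCut (u0 :: xs))
    set nc : List Nat := (List.range' 1 rest.length).filter (fun (i : Nat) => mnCut (u0 :: xs) (i : Int)) with hncdef
    have hmemnc : ∀ i ∈ nc, 0 < i ∧ i < (u0 :: xs).length := by
      intro i hi
      have h1 := (List.mem_filter.mp hi).1
      rcases List.mem_range'.mp h1 with ⟨k, hk, hik⟩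
      omega
    -- the Int-valued pair list is the image of the Nat-valued one
    have hzip : (((0 : Int) :: (PySem.List.pyRange 1 (((u0 :: xs).length : Nat) : Int) 1).filter (mnCut (u0 :: xs))).zip
          ((PySem.List.pyRange 1 (((u0 :: xs).length : Nat) : Int) 1).filter (mnCut (u0 :: xs)) ++ [(((u0 :: xs).length : Nat) : Int)]))
        = ((0 :: nc).zip (nc ++ [(u0 :: xs).length])).map
            (Prod.map (fun (i : Nat) => (i : Int)) (fun (i : Nat) => (i : Int))) := by
      rw [hnc]
      rw [show ((0 : Int) :: nc.map (fun (i : Nat) => (i : Int)))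
          = (0 :: nc).map (fun (i : Nat) => (i : Int)) by simp]
      rw [show (nc.map (fun (i : Nat) => (i : Int)) ++ [(((u0 :: xs).length : Nat) : Int)])
          = (nc ++ [(u0 :: xs).length]).map (fun (i : Nat) => (i : Int)) by simp]
      rw [List.zip_map]
    rw [hzip, List.map_map]
    have hparts : (((0 :: nc).zip (nc ++ [(u0 :: xs).length])).map
          ((fun ab => PySem.List.slice (u0 :: xs) (some ab.1) (some ab.2)) ∘
            Prod.map (fun (i : Nat) => (i : Int)) (fun (i : Nat) => (i : Int))))
        = ((0 :: nc).zip (nc ++ [(u0 :: xs).length])).map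
            (fun ab => ((u0 :: xs).drop ab.1).take (ab.2 - ab.1)) := by
      apply List.map_congr_left
      intro ab _
      simp only [Function.comp, Prod.map]
      exact PySem.List.slice_natCast (u0 :: xs) ab.1 ab.2
    rw [hparts]
    rw [mn_join_slices (u0 :: xs) nc 0 (by omega)
        (List.Pairwise.filter _ (List.pairwise_lt_range' (s := 1) (n := rest.length)))
        hmemnc]
    -- evaluate the indexed flatMap back to the common form
    rw [show (u0 :: xs).length - 0 = xs.length + 1 by simp, List.range'_succ]
    rw [List.flatMap_cons]
    have h0nc : (0 : Nat) ∉ nc := fun h => absurd (hmemnc 0 h).1 (by omega)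
    rw [if_neg h0nc]
    have hcong : (List.range' 1 xs.length).flatMap
          (fun i => (if i ∈ nc then [' '] else []) ++ [(u0 :: xs).getD i ' '])
        = (List.range' 1 xs.length).flatMap
          (fun i => (if mnCond ((u0 :: xs).getD (i - 1) ' ') ((u0 :: xs).getD i ' ') then [' '] else [])
            ++ [(u0 :: xs).getD i ' ']) := by
      apply List.flatMap_congr
      intro i hi
      rcases List.mem_range'.mp hi with ⟨k, hk, hik⟩
      have hxl : xs.length = rest.length := by simp [hxs]
      have hmem : i ∈ nc ↔ mnCut (u0 :: xs) (i : Int) = true := by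
        rw [hncdef, List.mem_filter]
        have : i ∈ List.range' 1 rest.length := by
          apply List.mem_range'.mpr
          exact ⟨k, by omega, hik⟩
        simp [this]
      have hcut : mnCut (u0 :: xs) (i : Int)
          = mnCond ((u0 :: xs).getD (i - 1) ' ') ((u0 :: xs).getD i ' ') := by
        unfold mnCut mnCond
        rw [PySem.List.pyGetD_natCast, show (i : Int) - 1 = ((i - 1 : Nat) : Int) by omega,
          PySem.List.pyGetD_natCast]
      rw [hcut] at hmem
      by_cases hc : mnCond ((u0 :: xs).getD (i - 1) ' ') ((u0 :: xs).getD i ' ') = true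
      · rw [if_pos (hmem.mpr hc), if_pos hc]
      · rw [if_neg (fun h => hc (hmem.mp h)), if_neg hc]
    rw [hcong, mn_flatMap_pieces xs u0]
    rfl
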